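-- pv_equiv track=rewrite | github.com/miloauguste/AgenticAI-mod7 | enhanced_agents_part3.py | _add_section_headings
-- ===== SOURCE A (Python) =====
-- def _add_section_headings(content: str) -> str:
--     """Add section headings for better structure"""
--
--     paragraphs = content.split('\n\n')
--     if len(paragraphs) < 3:
--         return content
--
--     # Add headings every 2-3 paragraphs for long content
--     if len(paragraphs) >= 6:
--         enhanced_paragraphs = []
--         for i, paragraph in enumerate(paragraphs):
--             if i == 2:  # Add heading before 3rd paragraph
--                 enhanced_paragraphs.append("## Key Benefits and Applications")
--             elif i == len(paragraphs) - 2:  # Add heading before second-to-last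
--                 enhanced_paragraphs.append("## Implementation and Next Steps")
--
--             enhanced_paragraphs.append(paragraph)
--
--         return '\n\n'.join(enhanced_paragraphs)
--
--     return content
-- ===== SOURCE B (Python) =====
-- def _positions(s: str, start: int) -> list:
--     """Indices of the non-overlapping separator occurrences in s from start on."""
--     i = s.find('\n\n', start)
--     if i == -1:
--         return []
--     return [i] + _positions(s, i + 2)
--
--
-- def _add_section_headings(content: str) -> str:
--     """Add section headings for better structure"""
--     pos = _positions(content, 0)
--     # pos has len(paragraphs) - 1 entries; headings only for >= 6 paragraphs
--     if len(pos) < 5: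
--         return content
--     p1, p2 = pos[1], pos[-2]
--     return (content[:p1] + '\n\n' + "## Key Benefits and Applications"
--             + content[p1:p2] + '\n\n' + "## Implementation and Next Steps"
--             + content[p2:])
-- ===== Notes on version B (the rewrite author's own statement) =====
-- stated objective: alternative
-- what changed: B never builds a paragraph list: instead of splitting on the blank-line separator, looping with enumerate and per-index insertion, and re-joining, it recursively collects the character positions of the separators with str.find and splices the two headings into the original string by position-based slicing.
import Mathlib
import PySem

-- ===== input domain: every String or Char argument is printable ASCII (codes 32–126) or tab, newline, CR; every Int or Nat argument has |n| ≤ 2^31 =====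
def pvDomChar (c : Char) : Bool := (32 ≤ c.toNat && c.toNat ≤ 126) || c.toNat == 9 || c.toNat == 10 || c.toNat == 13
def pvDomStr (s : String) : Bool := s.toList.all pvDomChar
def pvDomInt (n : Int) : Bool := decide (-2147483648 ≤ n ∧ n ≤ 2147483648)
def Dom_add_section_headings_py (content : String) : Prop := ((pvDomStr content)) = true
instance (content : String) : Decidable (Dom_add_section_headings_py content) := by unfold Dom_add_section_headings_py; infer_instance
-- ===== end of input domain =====

-- B drops the paragraph list entirely: instead of splitting on the blank-line separator,
-- an enumerate loop and a join, it collects the character positions of the separators by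
-- repeated str.find and splices the two headings in by position-based slicing (alternative).

-- ===== PORT A =====
def add_section_headings_py (content : String) : String :=
  -- content.split on the blank-line separator: it is nonempty, so split? is always `some`
  let paragraphs := (PySem.Str.split? content "\n\n").getD []
  if paragraphs.length < 3 then content
  else if 6 ≤ paragraphs.length then
    let enhanced := (PySem.List.enumerate paragraphs).foldl
      (fun acc ip =>
        (if ip.1 = 2 then acc ++ ["## Key Benefits and Applications"]
         else if ip.1 = (paragraphs.length : Int) - 2 then acc ++ ["## Implementation and Next Steps"]
         else acc) ++ [ip.2])
      []
    PySem.Str.join "\n\n" enhanced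
  else content

-- ===== PORT B =====
-- helper _positions(s, start): indices of the non-overlapping separator occurrences;
-- the fuel argument only makes the recursion total (len+1 is always enough)
def pvPositionsB (s : String) (fuel : Nat) (start : Int) : List Int :=
  match fuel with
  | 0 => []
  | fuel + 1 =>
    let i := PySem.Str.findFrom s "\n\n" start
    if i = -1 then [] else i :: pvPositionsB s fuel (i + 2)

def add_section_headings_py_alt (content : String) : String :=
  let pos := pvPositionsB content (content.toList.length + 1) 0
  if pos.length < 5 then content
  else
    let p1 := (PySem.List.pyGet? pos 1).getD 0      -- pos[1]; in range under the guard
    let p2 := (PySem.List.pyGet? pos (-2)).getD 0   -- pos[-2]; in range under the guard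
    PySem.Str.slice content none (some p1) ++ "\n\n" ++ "## Key Benefits and Applications"
      ++ PySem.Str.slice content (some p1) (some p2) ++ "\n\n" ++ "## Implementation and Next Steps"
      ++ PySem.Str.slice content (some p2) none

-- ===== PRECONDITION & SPEC =====
def Spec_add_section_headings_py (content : String) (out : String) : Prop := out = add_section_headings_py_alt content
instance (content : String) (out : String) : Decidable (Spec_add_section_headings_py content out) := by unfold Spec_add_section_headings_py; infer_instance

-- ===== CLAIM (what is proved, stated in full; the proofs are below) =====
def Claim_equal_add_section_headings_py : Prop := ∀ (content : String), Dom_add_section_headings_py content → Spec_add_section_headings_py content (add_section_headings_py content)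

-- ===== LEMMAS AND PROOFS =====

-- the separator as a character list
def pvSep : List Char := ['\n', '\n']

-- reference recursion: Python's split('\n\n') characterised through str.find
def pvSplitRec (s : List Char) : List (List Char) :=
  if h : PySem.Chars.find s pvSep < 0 then [s]
  else s.take (PySem.Chars.find s pvSep).toNat
        :: pvSplitRec (s.drop ((PySem.Chars.find s pvSep).toNat + 2))
termination_by s.length
decreasing_by
  have h0 : (0 : Int) ≤ PySem.Chars.find s pvSep := by omega
  have hpre := (PySem.Chars.find_spec h0).1
  have hlen : pvSep.length ≤ (s.drop (PySem.Chars.find s pvSep).toNat).length :=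
    hpre.length_le
  have hsl : pvSep.length = 2 := rfl
  rw [hsl, List.length_drop] at hlen
  simp only [List.length_drop]
  omega

lemma pv_splitRec_ne_nil (s : List Char) : pvSplitRec s ≠ [] := by
  rw [pvSplitRec.eq_def]
  split <;> simp

-- find is characterised by "first position where sub is a prefix"
lemma pv_find_eq (s sub : List Char) (p : Nat)
    (hp : sub <+: s.drop p) (hmin : ∀ i < p, ¬ sub <+: s.drop i) :
    PySem.Chars.find s sub = (p : Int) := by
  have hinf : sub <:+: s := hp.isInfix.trans (s.drop_suffix p).isInfix
  have h0 : (0 : Int) ≤ PySem.Chars.find s sub :=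
    (PySem.Chars.find_nonneg_iff s sub).mpr hinf
  obtain ⟨h1, h2⟩ := PySem.Chars.find_spec h0
  have hge : p ≤ (PySem.Chars.find s sub).toNat := by
    by_contra hlt
    exact hmin _ (by omega) h1
  have hle : (PySem.Chars.find s sub).toNat ≤ p := by
    by_contra hlt
    exact h2 p (by omega) hp
  omega

lemma pv_find_prefix (s sub : List Char) (h : sub <+: s) :
    PySem.Chars.find s sub = 0 := by
  have := pv_find_eq s sub 0 (by simpa using h) (by omega)
  simpa using this

lemma pv_find_cons (c : Char) (rest sub : List Char) (h0 : ¬ sub <+: (c :: rest)) :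
    PySem.Chars.find (c :: rest) sub =
      if PySem.Chars.find rest sub = -1 then -1 else 1 + PySem.Chars.find rest sub := by
  by_cases hm : PySem.Chars.find rest sub = -1
  · rw [if_pos hm]
    rw [PySem.Chars.find_eq_neg_one_iff] at hm ⊢
    intro hinf
    obtain ⟨j, hj⟩ := (PySem.Chars.exists_prefix_drop_iff_isIn sub (c :: rest)).mpr
      ((PySem.Chars.isIn_iff_infix sub (c :: rest)).mpr hinf)
    cases j with
    | zero => exact h0 (by simpa using hj)
    | succ m =>
        exact hm (hj.isInfix.trans ((rest.drop_suffix m).isInfix))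
  · rw [if_neg hm]
    have hge : (0 : Int) ≤ PySem.Chars.find rest sub := by
      have := PySem.Chars.neg_one_le_find rest sub
      omega
    obtain ⟨h1, h2⟩ := PySem.Chars.find_spec hge
    have := pv_find_eq (c :: rest) sub ((PySem.Chars.find rest sub).toNat + 1)
      (by simpa using h1)
      (by
        intro i hi
        cases i with
        | zero => exact fun hq => h0 (by simpa using hq)
        | succ m => exact fun hq => h2 m (by omega) (by simpa using hq))
    rw [this]
    omega

lemma pv_modifyHead_nil_append (l : List (List Char)) :
    l.modifyHead (fun x => [] ++ x) = l := by
  cases l <;> simp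

lemma pv_modifyHead_id (l : List (List Char)) :
    l.modifyHead (fun x => x) = l := by
  cases l <;> simp

-- the splitOn worker equals the reference recursion
lemma pv_go_eq : ∀ (fuel : Nat) (s cur : List Char) (acc : List (List Char)),
    s.length < fuel →
    PySem.Chars.splitOn.go pvSep fuel s cur acc
      = acc.reverse ++ (pvSplitRec s).modifyHead (fun x => cur.reverse ++ x) := by
  intro fuel
  induction fuel with
  | zero => intro s cur acc h; omega
  | succ fuel ih =>
    intro s cur acc h
    cases s with
    | nil =>
      have hgo : PySem.Chars.splitOn.go pvSep (fuel+1) [] cur acc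
          = (cur.reverse :: acc).reverse := by
        conv_lhs => rw [PySem.Chars.splitOn.go.eq_def]
      rw [hgo, pvSplitRec.eq_def]
      have hfind : PySem.Chars.find [] pvSep = -1 := by decide
      simp [hfind]
    | cons c rest =>
      have hgo : PySem.Chars.splitOn.go pvSep (fuel+1) (c :: rest) cur acc
          = if pvSep.isPrefixOf (c :: rest)
            then PySem.Chars.splitOn.go pvSep fuel (List.drop pvSep.length (c :: rest)) [] (cur.reverse :: acc)
            else PySem.Chars.splitOn.go pvSep fuel rest (c :: cur) acc := by
        conv_lhs => rw [PySem.Chars.splitOn.go.eq_def]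
      rw [hgo]
      by_cases hpre : pvSep <+: (c :: rest)
      · rw [if_pos (List.isPrefixOf_iff_prefix.mpr hpre)]
        have hlen : (List.drop pvSep.length (c :: rest)).length < fuel := by
          simp only [List.length_drop, List.length_cons, pvSep] at h ⊢
          omega
        rw [ih _ _ _ hlen]
        have hfind : PySem.Chars.find (c :: rest) pvSep = 0 := pv_find_prefix _ _ hpre
        conv_rhs => rw [pvSplitRec.eq_def]
        rw [hfind]
        simp [pv_modifyHead_id, pvSep]
      · rw [if_neg (by simpa [List.isPrefixOf_iff_prefix] using hpre)]
        have hlen : rest.length < fuel := by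
          simp only [List.length_cons] at h; omega
        rw [ih _ _ _ hlen]
        have hfind := pv_find_cons c rest pvSep hpre
        by_cases hm : PySem.Chars.find rest pvSep = -1
        · rw [hm, if_pos rfl] at hfind
          conv_rhs => rw [pvSplitRec.eq_def]
          conv_lhs => rw [pvSplitRec.eq_def]
          rw [hfind, hm]
          norm_num
        · rw [if_neg hm] at hfind
          have hge : (0 : Int) ≤ PySem.Chars.find rest pvSep := by
            have := PySem.Chars.neg_one_le_find rest pvSep
            omega
          conv_rhs => rw [pvSplitRec.eq_def]
          conv_lhs => rw [pvSplitRec.eq_def]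
          rw [hfind]
          rw [dif_neg (by omega), dif_neg (by omega)]
          have ht : (1 + PySem.Chars.find rest pvSep).toNat
              = (PySem.Chars.find rest pvSep).toNat + 1 := by omega
          rw [ht]
          simp [List.take_succ_cons, List.drop_succ_cons]

lemma pv_splitOn_eq (s : List Char) :
    PySem.Chars.splitOn s pvSep = pvSplitRec s := by
  have h := pv_go_eq (s.length + 1) s [] [] (by omega)
  have hid : (pvSplitRec s).modifyHead (fun x => List.reverse [] ++ x) = pvSplitRec s :=
    pv_modifyHead_nil_append _
  rw [PySem.Chars.splitOn, h]
  simpa using hid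

-- joining the split gives the string back
lemma pv_sep_split (s : List Char) (h0 : (0:Int) ≤ PySem.Chars.find s pvSep) :
    s = s.take (PySem.Chars.find s pvSep).toNat ++ pvSep
        ++ s.drop ((PySem.Chars.find s pvSep).toNat + 2) := by
  set j := (PySem.Chars.find s pvSep).toNat with hj
  have hpre := (PySem.Chars.find_spec h0).1
  obtain ⟨t, ht⟩ := hpre
  have htl : t = s.drop (j + 2) := by
    have h2 := congrArg (List.drop pvSep.length) ht
    rw [List.drop_left, List.drop_drop] at h2
    have hsl : pvSep.length = 2 := rfl
    rw [hsl] at h2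
    rw [h2, Nat.add_comm]
  conv_lhs => rw [← List.take_append_drop j s]
  rw [← ht, htl, List.append_assoc]

lemma pv_join_splitRec (s : List Char) :
    PySem.Chars.join pvSep (pvSplitRec s) = s := by
  induction s using pvSplitRec.induct with
  | case1 s hneg =>
    rw [pvSplitRec.eq_def, dif_pos hneg]
    exact PySem.Chars.join_singleton _ _
  | case2 s hneg ih =>
    rw [pvSplitRec.eq_def, dif_neg hneg]
    obtain ⟨q, r, hqr⟩ : ∃ q r,
        pvSplitRec (s.drop ((PySem.Chars.find s pvSep).toNat + 2)) = q :: r := by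
      cases hx : pvSplitRec (s.drop ((PySem.Chars.find s pvSep).toNat + 2)) with
      | nil => exact absurd hx (pv_splitRec_ne_nil _)
      | cons q r => exact ⟨q, r, rfl⟩
    rw [hqr, PySem.Chars.join_cons_cons, ← hqr, ih]
    exact (pv_sep_split s (by omega)).symm

-- positions of the separators, computed from the split
def pvQ : List (List Char) → List Nat
  | [] => []
  | [_] => []
  | p :: q :: r => p.length :: (pvQ (q :: r)).map (· + (p.length + 2))

lemma pvQ_length : ∀ ps : List (List Char), (pvQ ps).length = ps.length - 1 := by
  intro ps
  induction ps using pvQ.induct <;> simp [pvQ, *]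

lemma pvQ_get : ∀ (ps : List (List Char)) (m : Nat), m + 1 < ps.length →
    (pvQ ps)[m]? = some ((PySem.Chars.join pvSep (ps.take (m+1))).length) := by
  intro ps
  induction ps using pvQ.induct with
  | case1 => intro m h; simp at h
  | case2 p => intro m h; simp at h
  | case3 p q r ih =>
    intro m h
    cases m with
    | zero => simp [pvQ, PySem.Chars.join_singleton]
    | succ m =>
      have hm : m + 1 < (q :: r).length := by simp at h ⊢; omega
      simp only [pvQ, List.getElem?_cons_succ, List.getElem?_map, ih m hm,
        Option.map_some]
      obtain ⟨x, xs, hx⟩ : ∃ x xs, (q :: r).take (m+1) = x :: xs := by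
        cases hc : (q :: r).take (m+1) with
        | nil => simp at hc
        | cons x xs => exact ⟨x, xs, rfl⟩
      conv_rhs => rw [List.take_succ_cons, hx, PySem.Chars.join_cons_cons, ← hx]
      have hsl : pvSep.length = 2 := rfl
      simp [hsl]
      omega

-- join distributes over ++ of nonempty part lists
lemma pv_join_append (sep : List Char) :
    ∀ (xs ys : List (List Char)), xs ≠ [] → ys ≠ [] →
    PySem.Chars.join sep (xs ++ ys)
      = PySem.Chars.join sep xs ++ sep ++ PySem.Chars.join sep ys := by
  intro xs
  induction xs with
  | nil => intro ys h; exact absurd rfl h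
  | cons x xs ih =>
    intro ys _ hys
    cases xs with
    | nil =>
      obtain ⟨y, ys', hy⟩ : ∃ y ys', ys = y :: ys' := by
        cases ys with
        | nil => exact absurd rfl hys
        | cons y ys' => exact ⟨y, ys', rfl⟩
      subst hy
      rw [List.singleton_append, PySem.Chars.join_cons_cons,
        PySem.Chars.join_singleton]
    | cons x2 xs2 =>
      rw [List.cons_append, List.cons_append, PySem.Chars.join_cons_cons,
        ← List.cons_append, ih ys (by simp) hys,
        PySem.Chars.join_cons_cons]
      simp

-- the B-side position scan equals pvQ of the split
lemma pv_pos_eq : ∀ (fuel : Nat) (s : String) (k : Nat),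
    k ≤ s.toList.length → s.toList.length - k < fuel →
    pvPositionsB s fuel (k : Int)
      = (pvQ (pvSplitRec (s.toList.drop k))).map (fun n => ((n + k : Nat) : Int)) := by
  intro fuel
  induction fuel with
  | zero => intro s k hk h; omega
  | succ fuel ih =>
    intro s k hk h
    rw [pvPositionsB]
    simp only [PySem.Str.findFrom_eq]
    have hsep : ("\n\n" : String).toList = pvSep := by decide
    rw [hsep, PySem.Chars.findFrom_natCast s.toList pvSep k hk]
    by_cases hm : PySem.Chars.find (s.toList.drop k) pvSep = -1
    · rw [if_pos hm]
      rw [pvSplitRec.eq_def, dif_pos (by omega)]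
      simp [pvQ]
    · have hge : (0 : Int) ≤ PySem.Chars.find (s.toList.drop k) pvSep := by
        have := PySem.Chars.neg_one_le_find (s.toList.drop k) pvSep
        omega
      set j := (PySem.Chars.find (s.toList.drop k) pvSep).toNat with hj
      have hjv : PySem.Chars.find (s.toList.drop k) pvSep = (j : Int) := by omega
      have hjle : j + 2 ≤ s.toList.length - k := by
        have hpre := (PySem.Chars.find_spec hge).1
        have hle := hpre.length_le
        have hsl : pvSep.length = 2 := rfl
        rw [hsl, List.length_drop, List.length_drop] at hle
        omega
      rw [if_neg hm, if_neg (by omega)]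
      have hdd : (s.toList.drop k).drop (j + 2) = s.toList.drop (k + j + 2) := by
        rw [List.drop_drop]; ring_nf
      have hsplit : pvSplitRec (s.toList.drop k)
          = (s.toList.drop k).take j :: pvSplitRec (s.toList.drop (k + j + 2)) := by
        conv_lhs => rw [pvSplitRec.eq_def]
        rw [dif_neg (by omega), ← hj, hdd]
      have hstep : (↑k + PySem.Chars.find (s.toList.drop k) pvSep + 2 : Int)
          = ((k + j + 2 : Nat) : Int) := by push_cast; omega
      rw [hstep, ih s (k + j + 2) (by omega) (by omega), hsplit]
      obtain ⟨q, r, hqr⟩ : ∃ q r, pvSplitRec (s.toList.drop (k + j + 2)) = q :: r := by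
        cases hx : pvSplitRec (s.toList.drop (k + j + 2)) with
        | nil => exact absurd hx (pv_splitRec_ne_nil _)
        | cons q r => exact ⟨q, r, rfl⟩
      rw [hqr]
      have htl : ((s.toList.drop k).take j).length = j := by
        rw [List.length_take, List.length_drop]; omega
      simp only [pvQ, htl, List.map_cons, List.map_map]
      refine congrArg₂ List.cons ?_ ?_
      · rw [hjv]; push_cast; omega
      · apply List.map_congr_left
        intro n _
        simp only [Function.comp]
        congr 1
        omega

-- A's fold, reduced to take/drop form (reference shape of A's result)
def pvSliceForm (content : String) : String :=
  let ps := (PySem.Str.split? content "\n\n").getD []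
  if ps.length < 6 then content
  else
    PySem.Str.join "\n\n"
      (ps.take 2 ++ ["## Key Benefits and Applications"]
        ++ (ps.drop 2).take (ps.length - 4)
        ++ ["## Implementation and Next Steps"] ++ ps.drop (ps.length - 2))

-- per-element contribution of A's loop body, as a flatMap piece
def pvPiece (n : Int) (ip : Int × String) : List String :=
  (if ip.1 = 2 then ["## Key Benefits and Applications"]
   else if ip.1 = n - 2 then ["## Implementation and Next Steps"]
   else []) ++ [ip.2]

lemma pv_body_eq (n : Int) (acc : List String) (ip : Int × String) :
    (if ip.1 = 2 then acc ++ ["## Key Benefits and Applications"]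
     else if ip.1 = n - 2 then acc ++ ["## Implementation and Next Steps"]
     else acc) ++ [ip.2] = acc ++ pvPiece n ip := by
  unfold pvPiece; split_ifs <;> simp

-- tail of A's loop: indices k, k+1, …; the second heading lands before the
-- second-to-last element
lemma pv_tail (q : List String) : ∀ (k : Nat) (n : Int),
    n = (k : Int) + q.length → 3 ≤ k → 2 ≤ q.length →
    (PySem.List.enumerate q (k : Int)).flatMap (pvPiece n)
      = q.take (q.length - 2) ++ ["## Implementation and Next Steps"] ++ q.drop (q.length - 2) := by
  induction q with
  | nil => intro k n _ _ h; simp at h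
  | cons x q' ih =>
    intro k n hn hk hlen
    have hn' : n = (k : Int) + q'.length + 1 := by
      simp only [List.length_cons] at hn; push_cast at hn ⊢; omega
    by_cases h2 : 2 ≤ q'.length
    · have hx : pvPiece n ((k : Int), x) = [x] := by
        unfold pvPiece
        have c1 : ¬ ((k : Int) = 2) := by omega
        have c2 : ¬ ((k : Int) = n - 2) := by omega
        rw [if_neg c1, if_neg c2]; simp
      have hrec := ih (k + 1) n (by push_cast; omega) (by omega) h2
      rw [PySem.List.enumerate_cons]
      push_cast at hrec ⊢
      simp only [List.flatMap_cons, hrec, hx]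
      have h1 : (x :: q').length - 2 = (q'.length - 2) + 1 := by simp; omega
      rw [h1]
      simp [List.take_succ_cons, List.drop_succ_cons]
    · -- q' has exactly one element: q = [x, z]
      have h1 : q'.length = 1 := by simp at hlen; omega
      obtain ⟨z, hz⟩ := List.length_eq_one_iff.mp h1
      subst hz
      have hn2 : n = (k : Int) + 2 := by push_cast at hn'; omega
      rw [PySem.List.enumerate_cons, PySem.List.enumerate_cons, PySem.List.enumerate_nil]
      have hpx : pvPiece n ((k : Int), x) = ["## Implementation and Next Steps", x] := by
        unfold pvPiece
        have hne : ¬ ((k : Int) = 2) := by omega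
        have heq : (k : Int) = n - 2 := by omega
        rw [if_neg hne, if_pos heq]; simp
      have hpz : pvPiece n ((k : Int) + 1, z) = [z] := by
        unfold pvPiece
        have c1 : ¬ ((k : Int) + 1 = 2) := by omega
        have c2 : ¬ ((k : Int) + 1 = n - 2) := by omega
        rw [if_neg c1, if_neg c2]; simp
      simp [hpx, hpz]

lemma pv_A_eq_slice (content : String) :
    add_section_headings_py content = pvSliceForm content := by
  simp only [add_section_headings_py, pvSliceForm]
  generalize (PySem.Str.split? content "\n\n").getD [] = ps
  by_cases hlt : ps.length < 3
  · have h5' : ps.length < 6 := by omega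
    have h6' : ¬ 6 ≤ ps.length := by omega
    simp [hlt, h5']
  · by_cases h6 : 6 ≤ ps.length
    · have hge : ¬ ps.length < 6 := by omega
      simp only [hlt, h6, hge, if_false, if_true]
      obtain ⟨a, ps1, h1⟩ : ∃ a t, ps = a :: t := by
        cases ps with | nil => simp at h6 | cons a t => exact ⟨a, t, rfl⟩
      obtain ⟨b, ps2, h2⟩ : ∃ b t, ps1 = b :: t := by
        cases ps1 with | nil => subst h1; simp at h6 | cons b t => exact ⟨b, t, rfl⟩
      obtain ⟨c, rest, h3⟩ : ∃ c t, ps2 = c :: t := by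
        cases ps2 with | nil => subst h1 h2; simp at h6 | cons c t => exact ⟨c, t, rfl⟩
      subst h3; subst h2; subst h1
      have hrlen : 3 ≤ rest.length := by simp at h6; omega
      congr 1
      -- LHS: turn the fold into a flatMap of pvPiece
      rw [PySem.List.foldl_congr_mem _ _
            (fun acc ip => acc ++ pvPiece ((a :: b :: c :: rest).length : Int) ip) _
            (by intro acc ip _; exact pv_body_eq _ acc ip),
          PySem.List.foldl_append_eq_flatMap]
      rw [PySem.List.enumerate_cons, PySem.List.enumerate_cons, PySem.List.enumerate_cons]
      simp only [List.flatMap_cons, List.nil_append]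
      have hL : ((a :: b :: c :: rest).length : Int) = (rest.length : Int) + 3 := by
        simp; omega
      have hpa : pvPiece ((a :: b :: c :: rest).length : Int) (0, a) = [a] := by
        unfold pvPiece
        rw [if_neg (by norm_num), if_neg (by rw [hL]; omega)]; simp
      have hpb : pvPiece ((a :: b :: c :: rest).length : Int) (0 + 1, b) = [b] := by
        unfold pvPiece
        rw [if_neg (by norm_num), if_neg (by rw [hL]; omega)]; simp
      have hpc : pvPiece ((a :: b :: c :: rest).length : Int) (0 + 1 + 1, c)
          = ["## Key Benefits and Applications", c] := by
        unfold pvPiece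
        rw [if_pos (by norm_num)]; simp
      have htail := pv_tail rest 3 ((a :: b :: c :: rest).length : Int)
        (by rw [hL]; push_cast; omega) (by omega) (by omega)
      rw [hpa, hpb, hpc]
      have h00 : (0 : Int) + 1 + 1 + 1 = ((3 : Nat) : Int) := by norm_num
      rw [h00, htail]
      -- RHS: evaluate the take/drop pieces on the cons decomposition
      have hT2 : (a :: b :: c :: rest).take 2 = [a, b] := by
        simp [List.take_succ_cons]
      have hD2 : (a :: b :: c :: rest).drop 2 = c :: rest := by
        simp [List.drop_succ_cons]
      have hM : (c :: rest).take ((a :: b :: c :: rest).length - 4)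
          = c :: rest.take (rest.length - 2) := by
        have hl4 : (a :: b :: c :: rest).length - 4 = (rest.length - 2) + 1 := by
          simp; omega
        rw [hl4, List.take_succ_cons]
      have hE : (a :: b :: c :: rest).drop ((a :: b :: c :: rest).length - 2)
          = rest.drop (rest.length - 2) := by
        have hl2 : (a :: b :: c :: rest).length - 2 = (rest.length - 2) + 3 := by
          simp; omega
        rw [hl2]
        simp [List.drop_succ_cons]
      rw [hT2, hD2, hM, hE]
      simp
    · have h5 : ps.length < 6 := by omega
      simp [hlt, h6, h5]

lemma pv_B_eq (content : String) :
    add_section_headings_py_alt content = pvSliceForm content := by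
  -- the split of the content, on the string and the character level
  obtain ⟨psS, hsome, hmap⟩ : ∃ psS, PySem.Str.split? content "\n\n" = some psS ∧
      psS.map String.toList = pvSplitRec content.toList := by
    have h1 : PySem.Chars.split? content.toList pvSep = some (pvSplitRec content.toList) := by
      rw [PySem.Chars.split?.eq_1, if_neg (by decide), pv_splitOn_eq]
    have h2 := PySem.Str.split?_map content "\n\n"
    rw [show ("\n\n" : String).toList = pvSep from by decide, h1] at h2
    exact Option.map_eq_some_iff.mp h2
  have hlenS : psS.length = (pvSplitRec content.toList).length := by
    rw [← hmap, List.length_map]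
  -- the scanned separator positions
  have hposition : pvPositionsB content (content.toList.length + 1) 0
      = (pvQ (pvSplitRec content.toList)).map (fun (n : Nat) => (n : Int)) := by
    have h := pv_pos_eq (content.toList.length + 1) content 0 (by omega) (by omega)
    simp only [Nat.cast_zero, List.drop_zero, Nat.add_zero] at h
    exact h
  simp only [add_section_headings_py_alt, pvSliceForm, hsome, Option.getD_some, hposition]
  rw [List.length_map, pvQ_length]
  by_cases h6 : (pvSplitRec content.toList).length < 6
  · rw [if_pos (by omega), if_pos (by omega : psS.length < 6)]
  · have hn6 : 6 ≤ (pvSplitRec content.toList).length := by omega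
    set ps := pvSplitRec content.toList with hps
    set n := ps.length with hnn
    rw [if_neg (by omega), if_neg (by omega : ¬ psS.length < 6)]
    -- the two separator positions
    have hq1 := pvQ_get ps 1 (by omega)
    have hq2 := pvQ_get ps (n - 3) (by omega)
    set q1 := (PySem.Chars.join pvSep (ps.take 2)).length with hq1v
    have hq2' : (pvQ ps)[n - 3]?
        = some ((PySem.Chars.join pvSep (ps.take (n - 2))).length) := by
      rw [show n - 3 + 1 = n - 2 from by omega] at hq2
      exact hq2
    set q2 := (PySem.Chars.join pvSep (ps.take (n - 2))).length with hq2v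
    have hp1 : (PySem.List.pyGet? ((pvQ ps).map (fun (m : Nat) => (m : Int))) 1).getD 0
        = ((q1 : Nat) : Int) := by
      rw [PySem.List.pyGet?_ofNat', List.getElem?_map, hq1]
      simp only [Option.map_some, Option.getD_some]
    have hp2 : (PySem.List.pyGet? ((pvQ ps).map (fun (m : Nat) => (m : Int))) (-2)).getD 0
        = ((q2 : Nat) : Int) := by
      rw [PySem.List.pyGet?_neg_ofNat _ 2 (by omega)
            (by rw [List.length_map, pvQ_length]; omega)]
      rw [List.length_map, pvQ_length, List.getElem?_map]
      rw [show n - 1 - 2 = n - 3 from by omega, hq2']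
      simp only [Option.map_some, Option.getD_some]
    rw [hp1, hp2]
    -- move to character lists
    rw [← String.toList_inj]
    simp only [String.toList_append, PySem.Str.toList_slice, PySem.Str.toList_join,
      PySem.Chars.slice_eq_listSlice, List.map_append, List.map_take, List.map_drop,
      List.map_cons, List.map_nil, hmap, hlenS]
    rw [show ("\n\n" : String).toList = pvSep from by decide]
    rw [PySem.List.slice_to_natCast, PySem.List.slice_natCast, PySem.List.slice_from_natCast]
    -- notation for the three joined chunks
    set X1 := PySem.Chars.join pvSep (ps.take 2) with hX1
    set X2 := PySem.Chars.join pvSep ((ps.drop 2).take (n - 4)) with hX2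
    set X3 := PySem.Chars.join pvSep (ps.drop (n - 2)) with hX3
    -- nonemptiness of the chunk lists
    have hA : ps.take 2 ≠ [] :=
      List.ne_nil_of_length_pos (by rw [List.length_take]; omega)
    have hB : ps.drop 2 ≠ [] :=
      List.ne_nil_of_length_pos (by rw [List.length_drop]; omega)
    have hM : (ps.drop 2).take (n - 4) ≠ [] :=
      List.ne_nil_of_length_pos (by rw [List.length_take, List.length_drop]; omega)
    have hL : ps.drop (n - 2) ≠ [] :=
      List.ne_nil_of_length_pos (by rw [List.length_drop]; omega)
    -- decompositions of the joined string
    have hjoin : PySem.Chars.join pvSep ps = content.toList := pv_join_splitRec _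
    have h2 : content.toList = X1 ++ pvSep ++ PySem.Chars.join pvSep (ps.drop 2) := by
      have h := pv_join_append pvSep (ps.take 2) (ps.drop 2) hA hB
      rw [List.take_append_drop, hjoin] at h
      exact h
    have hcomb : ps.take 2 ++ (ps.drop 2).take (n - 4) = ps.take (n - 2) := by
      conv_rhs => rw [← List.take_append_drop 2 (ps.take (n - 2))]
      congr 1
      · rw [List.take_take]
        congr 1
        omega
      · rw [List.drop_take]
        congr 1
    have hT : PySem.Chars.join pvSep (ps.take (n - 2)) = X1 ++ pvSep ++ X2 := by
      have h := pv_join_append pvSep (ps.take 2) ((ps.drop 2).take (n - 4)) hA hM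
      rw [hcomb] at h
      exact h
    have hdd : (ps.drop 2).drop (n - 4) = ps.drop (n - 2) := by
      rw [List.drop_drop]
      congr 1
      omega
    have hD2 : PySem.Chars.join pvSep (ps.drop 2) = X2 ++ pvSep ++ X3 := by
      have h := pv_join_append pvSep ((ps.drop 2).take (n - 4)) ((ps.drop 2).drop (n - 4))
        hM (List.ne_nil_of_length_pos (by rw [List.length_drop, List.length_drop]; omega))
      rw [List.take_append_drop, hdd] at h
      exact h
    have hsplit2 : content.toList = (X1 ++ pvSep ++ X2) ++ pvSep ++ X3 := by
      have h := pv_join_append pvSep (ps.take (n - 2)) (ps.drop (n - 2))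
        (List.ne_nil_of_length_pos (by rw [List.length_take]; omega)) hL
      rw [List.take_append_drop, hjoin, hT] at h
      exact h
    -- the three slices of the content
    have hsl : pvSep.length = 2 := rfl
    have hq2len : q2 = X1.length + 2 + X2.length := by
      rw [hq2v, hT, List.length_append, List.length_append, hsl]
    have htake1 : content.toList.take q1 = X1 := by
      rw [h2, List.append_assoc, hq1v, List.take_left]
    have hdrop1 : content.toList.drop q1 = pvSep ++ PySem.Chars.join pvSep (ps.drop 2) := by
      rw [h2, List.append_assoc, hq1v, List.drop_left]
    have hdrop2 : content.toList.drop q2 = pvSep ++ X3 := by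
      rw [hsplit2, List.append_assoc, hq2len,
        show X1.length + 2 + X2.length = (X1 ++ pvSep ++ X2).length from by
          simp [hsl]; omega,
        List.drop_left]
    have hmid : (content.toList.drop q1).take (q2 - q1) = pvSep ++ X2 := by
      rw [hdrop1, hD2, hq2len, hq1v,
        show X1.length + 2 + X2.length - X1.length = pvSep.length + X2.length from by
          rw [hsl]; omega,
        List.take_append, List.take_of_length_le (le_refl _ |>.trans (by omega)),
        Nat.add_sub_cancel_left, List.append_assoc, List.take_left]
    rw [htake1, hmid, hdrop2]
    -- both sides are the same chunk concatenation
    have e1 : PySem.Chars.join pvSep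
          (["## Implementation and Next Steps".toList] ++ ps.drop (n - 2))
        = "## Implementation and Next Steps".toList ++ pvSep ++ X3 := by
      rw [pv_join_append pvSep _ _ (by simp) hL, PySem.Chars.join_singleton]
    have e2 : PySem.Chars.join pvSep
          ((ps.drop 2).take (n - 4)
            ++ (["## Implementation and Next Steps".toList] ++ ps.drop (n - 2)))
        = X2 ++ pvSep ++ ("## Implementation and Next Steps".toList ++ pvSep ++ X3) := by
      rw [pv_join_append pvSep _ _ hM (by simp), e1]
    have e3 : PySem.Chars.join pvSep
          (["## Key Benefits and Applications".toList]
            ++ ((ps.drop 2).take (n - 4)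
              ++ (["## Implementation and Next Steps".toList] ++ ps.drop (n - 2))))
        = "## Key Benefits and Applications".toList ++ pvSep
            ++ (X2 ++ pvSep ++ ("## Implementation and Next Steps".toList ++ pvSep ++ X3)) := by
      rw [pv_join_append pvSep _ _ (by simp)
          (by intro h; rw [List.append_eq_nil_iff] at h; exact hM h.1),
        e2, PySem.Chars.join_singleton]
    have e4 : PySem.Chars.join pvSep
          (ps.take 2
            ++ (["## Key Benefits and Applications".toList]
              ++ ((ps.drop 2).take (n - 4)
                ++ (["## Implementation and Next Steps".toList] ++ ps.drop (n - 2)))))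
        = X1 ++ pvSep
            ++ ("## Key Benefits and Applications".toList ++ pvSep
              ++ (X2 ++ pvSep ++ ("## Implementation and Next Steps".toList ++ pvSep ++ X3))) := by
      rw [pv_join_append pvSep _ _ hA (by simp), e3]
    simp only [List.append_assoc]
    rw [e4]
    simp [List.append_assoc]

-- ===== VERDICT (by name: the statement is the Claim_ definition above) =====
theorem add_section_headings_py_spec : Claim_equal_add_section_headings_py := by
  intro content _
  unfold Spec_add_section_headings_py
  rw [pv_A_eq_slice, pv_B_eq]
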